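-- pv_equiv track=rewrite | github.com/nainia-youness/anime_fight | insert_to_database/insert_chars_and_fights.py | create_fights
-- ===== SOURCE A (Python) =====
-- def create_fights(list_of_char_indexes):
--     def is_in_list(fight_list,char1,char2):
--         for fight in fight_list:
--             if(fight[1:3]==(char1,char2) or fight[1:3]==(char2,char1)):
--                 return True
--         return False
--
--
--     fight_list=[]
--     j=0
--     for char1 in list_of_char_indexes:
--         for char2 in list_of_char_indexes:
--             if(char1!=char2):
--                 if(not is_in_list(fight_list,char1,char2)):
--                     fight_list.append((j,char1,char2))
--                     j+=1
--
--     return fight_list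
-- ===== SOURCE B (Python) =====
-- def create_fights(list_of_char_indexes):
--     uniques = list(dict.fromkeys(list_of_char_indexes))
--     pairs = [(a, b) for i, a in enumerate(uniques) for b in uniques[i + 1:]]
--     return [(j, a, b) for j, (a, b) in enumerate(pairs)]
-- ===== Notes on version B (the rewrite author's own statement) =====
-- stated objective: simpler
-- what changed: Replaced the nested scan over the raw list with a linear membership dedup check by a dedup-then-combinations pipeline: order-preserving unique values via dict.fromkeys, then enumerate all pairs (a,b) with b after a in the unique list.
import Mathlib
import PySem

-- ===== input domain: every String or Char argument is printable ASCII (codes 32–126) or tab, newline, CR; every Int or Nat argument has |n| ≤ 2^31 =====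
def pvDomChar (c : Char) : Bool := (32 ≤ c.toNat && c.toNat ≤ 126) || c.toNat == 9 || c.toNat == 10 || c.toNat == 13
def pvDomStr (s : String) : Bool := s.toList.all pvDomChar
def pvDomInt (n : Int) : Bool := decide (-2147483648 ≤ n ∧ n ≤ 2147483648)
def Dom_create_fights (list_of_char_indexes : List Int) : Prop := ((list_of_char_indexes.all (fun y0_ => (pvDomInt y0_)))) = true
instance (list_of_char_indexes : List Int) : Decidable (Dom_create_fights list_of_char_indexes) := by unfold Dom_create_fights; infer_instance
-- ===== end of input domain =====

-- B replaces A's nested scans with linear dedup by an ordered-unique list followed by a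
-- combinations-style pair enumeration (simpler decomposition; return value only, no mutation).

-- ===== PORT A =====
-- helper is_in_list: fight[1:3] on a 3-tuple (j, a, b) is the pair (a, b)
def pvIsInList (fight_list : List (Int × Int × Int)) (char1 char2 : Int) : Bool :=
  match fight_list with
  | [] => false
  | fight :: rest =>
      if (fight.2.1, fight.2.2) = (char1, char2) ∨ (fight.2.1, fight.2.2) = (char2, char1)
      then true
      else pvIsInList rest char1 char2

-- inner 'for char2 in list_of_char_indexes' loop, state = (fight_list, j)
def pvInnerLoop (l : List Int) (char1 : Int) (st : List (Int × Int × Int) × Int) :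
    List (Int × Int × Int) × Int :=
  l.foldl (fun st char2 =>
    if char1 ≠ char2 then
      if ¬ (pvIsInList st.1 char1 char2 = true)
      then (st.1 ++ [(st.2, char1, char2)], st.2 + 1)
      else st
    else st) st

def create_fights (list_of_char_indexes : List Int) : List (Int × Int × Int) :=
  (list_of_char_indexes.foldl
    (fun st char1 => pvInnerLoop list_of_char_indexes char1 st)
    (([] : List (Int × Int × Int)), (0 : Int))).1

-- ===== PORT B =====
-- list(dict.fromkeys(xs)) is PySem.List.dedup; uniques[i+1:] with i ≥ 0 (enumerate index) is drop (i+1)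
def create_fights_alt (list_of_char_indexes : List Int) : List (Int × Int × Int) :=
  let uniques := PySem.List.dedup list_of_char_indexes
  let pairs := (PySem.List.enumerate uniques).flatMap
      (fun ia => (uniques.drop (ia.1.toNat + 1)).map (fun b => (ia.2, b)))
  (PySem.List.enumerate pairs).map (fun jp => (jp.1, jp.2.1, jp.2.2))

-- ===== PRECONDITION & SPEC =====
def Spec_create_fights (list_of_char_indexes : List Int) (out : List (Int × Int × Int)) : Prop := out = create_fights_alt list_of_char_indexes
instance (list_of_char_indexes : List Int) (out : List (Int × Int × Int)) : Decidable (Spec_create_fights list_of_char_indexes out) := by unfold Spec_create_fights; infer_instance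

-- ===== CLAIM (what is proved, stated in full; the proofs are below) =====
def Claim_equal_create_fights : Prop := ∀ (list_of_char_indexes : List Int), Dom_create_fights list_of_char_indexes → Spec_create_fights list_of_char_indexes (create_fights list_of_char_indexes)

-- ===== LEMMAS AND PROOFS =====

-- number a pair list: (j, a, b) with j = position
def pvNum (P : List (Int × Int)) : List (Int × Int × Int) :=
  (PySem.List.enumerate P).map (fun jp => (jp.1, jp.2.1, jp.2.2))

-- the state of A's loops is always (pvNum P, |P|)
def pvF (P : List (Int × Int)) : List (Int × Int × Int) × Int := (pvNum P, (P.length : Int))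

-- pairs of each element of S with everything after it inside S ++ T
def pvPP : List Int → List Int → List (Int × Int)
  | [], _ => []
  | a :: S, T => (S ++ T).map (fun b => (a, b)) ++ pvPP S T

lemma pvPP_nil (T : List Int) : pvPP [] T = [] := rfl
lemma pvPP_cons (a : Int) (S T : List Int) :
    pvPP (a :: S) T = (S ++ T).map (fun b => (a, b)) ++ pvPP S T := rfl

lemma pvNum_append (P : List (Int × Int)) (x : Int × Int) :
    pvNum (P ++ [x]) = pvNum P ++ [((P.length : Int), x.1, x.2)] := by
  simp [pvNum, PySem.List.enumerate_append, PySem.List.enumerate_cons, PySem.List.enumerate_nil]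

lemma pvF_append (P : List (Int × Int)) (c1 c2 : Int) :
    ((pvF P).1 ++ [((pvF P).2, c1, c2)], (pvF P).2 + 1) = pvF (P ++ [(c1, c2)]) := by
  simp [pvF, pvNum_append]

lemma pvIsInList_enum (P : List (Int × Int)) (x y : Int) : ∀ (s : Int),
    (pvIsInList ((PySem.List.enumerate P s).map (fun jp => (jp.1, jp.2.1, jp.2.2))) x y = true
      ↔ ((x, y) ∈ P ∨ (y, x) ∈ P)) := by
  induction P with
  | nil => intro s; simp [PySem.List.enumerate_nil, pvIsInList]
  | cons ab P ih =>
    intro s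
    rw [PySem.List.enumerate_cons]
    simp only [List.map_cons, pvIsInList]
    split_ifs with h
    · rw [Prod.mk.eta] at h
      simp only [true_iff]
      rcases h with h | h
      · exact Or.inl (by simp [h])
      · exact Or.inr (by simp [h])
    · rw [Prod.mk.eta] at h
      rw [ih (s+1)]
      rw [not_or] at h
      constructor
      · rintro (h1 | h1)
        · exact Or.inl (List.mem_cons_of_mem _ h1)
        · exact Or.inr (List.mem_cons_of_mem _ h1)
      · rintro (h1 | h1)
        · rcases List.mem_cons.mp h1 with h2 | h2
          · exact absurd h2.symm h.1
          · exact Or.inl h2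
        · rcases List.mem_cons.mp h1 with h2 | h2
          · exact absurd h2.symm h.2
          · exact Or.inr h2

lemma pvIsInList_num (P : List (Int × Int)) (x y : Int) :
    pvIsInList (pvNum P) x y = true ↔ ((x, y) ∈ P ∨ (y, x) ∈ P) :=
  pvIsInList_enum P x y 0

lemma pvPP_append_cons (S T : List Int) (c : Int) :
    pvPP (S ++ [c]) T = pvPP S (c :: T) ++ T.map (fun b => (c, b)) := by
  induction S with
  | nil => simp [pvPP_nil, pvPP_cons]
  | cons a S ih => simp [pvPP_cons, ih]

lemma mem_pvPP (S T : List Int) (x y : Int) (hx : x ∈ S) (hy : y ∈ S ++ T) (hxy : x ≠ y) :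
    (x, y) ∈ pvPP S T ∨ (y, x) ∈ pvPP S T := by
  induction S with
  | nil => simp at hx
  | cons a S ih =>
    rw [List.cons_append, List.mem_cons] at hy
    rcases List.mem_cons.mp hx with h | h
    · subst h
      left
      simp only [pvPP_cons, List.mem_append, List.mem_map]
      left
      refine ⟨y, ?_, rfl⟩
      rcases hy with h2 | h2
      · exact absurd h2.symm hxy
      · simpa using h2
    · rcases hy with h2 | h2
      · subst h2
        right
        simp only [pvPP_cons, List.mem_append, List.mem_map]
        left; exact ⟨x, by simp [h], rfl⟩
      · rcases ih h h2 with h4 | h4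
        · left; simp [pvPP_cons, h4]
        · right; simp [pvPP_cons, h4]

lemma fst_of_mem_pvPP (S T : List Int) (p : Int × Int) (hp : p ∈ pvPP S T) : p.1 ∈ S := by
  induction S with
  | nil => simp [pvPP_nil] at hp
  | cons a S ih =>
    simp only [pvPP_cons, List.mem_append, List.mem_map] at hp
    rcases hp with ⟨b, _, h⟩ | h
    · simp [← h]
    · simp [ih h]

-- unique decomposition at an element that occurs in neither prefix
lemma pvSplit_unique {l1 l2 l3 l4 : List Int} {c : Int} (h : l1 ++ c :: l2 = l3 ++ c :: l4)
    (h1 : c ∉ l1) (h3 : c ∉ l3) : l1 = l3 ∧ l2 = l4 := by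
  induction l1 generalizing l3 with
  | nil =>
    cases l3 with
    | nil => simpa using h
    | cons b l3 =>
      simp only [List.nil_append, List.cons_append, List.cons.injEq] at h
      exact absurd (h.1 ▸ List.mem_cons_self) h3
  | cons a l1 ih =>
    cases l3 with
    | nil =>
      simp only [List.nil_append, List.cons_append, List.cons.injEq] at h
      exact absurd (h.1 ▸ List.mem_cons_self) h1
    | cons b l3 =>
      simp only [List.cons_append, List.cons.injEq] at h
      have := ih h.2 (fun hm => h1 (List.mem_cons_of_mem _ hm)) (fun hm => h3 (List.mem_cons_of_mem _ hm))
      exact ⟨by rw [h.1, this.1], this.2⟩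

-- B's comprehension over enumerate/drop is pvPP of the unique list
lemma pvFlat_enum : ∀ (V W : List Int),
    (PySem.List.enumerate V (W.length : Int)).flatMap
      (fun ia => ((W ++ V).drop (ia.1.toNat + 1)).map (fun b => (ia.2, b))) = pvPP V [] := by
  intro V
  induction V with
  | nil => intro W; simp [PySem.List.enumerate_nil, pvPP_nil]
  | cons a V ih =>
    intro W
    rw [PySem.List.enumerate_cons]
    simp only [List.flatMap_cons]
    have h1 : ((W ++ a :: V).drop (((W.length : Int)).toNat + 1)) = V := by
      have : W ++ a :: V = (W ++ [a]) ++ V := by simp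
      rw [this, Int.toNat_natCast]
      have hlen : W.length + 1 = (W ++ [a]).length := by simp
      rw [hlen, List.drop_left]
    have h2 : (W.length : Int) + 1 = ((W ++ [a]).length : Int) := by simp
    have h3 : W ++ a :: V = (W ++ [a]) ++ V := by simp
    rw [h1, h2, h3, ih (W ++ [a]), pvPP_cons]
    simp

lemma pvAlt_eq (l : List Int) :
    create_fights_alt l = pvNum (pvPP (PySem.List.dedup l) []) := by
  unfold create_fights_alt pvNum
  simp only
  congr 2
  simpa using pvFlat_enum (PySem.List.dedup l) []

lemma pvDedup_prefix (q r : List Int) : PySem.List.dedup q <+: PySem.List.dedup (q ++ r) := by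
  simp only [PySem.List.dedup_eq_ofList, PySem.Set.ofList_append]
  rw [PySem.Set.update_eq_append_filter]
  exact ⟨_, rfl⟩

lemma pvDedup_snoc_not_mem (q : List Int) (c : Int) (hc : c ∉ q) :
    PySem.List.dedup (q ++ [c]) = PySem.List.dedup q ++ [c] := by
  simp only [PySem.List.dedup_eq_ofList, PySem.Set.ofList_append_singleton, PySem.Set.add]
  rw [if_neg]
  simp only [PySem.Set.contains_eq_listContains, List.contains_eq_mem, decide_eq_true_eq]
  intro hmem
  exact hc ((PySem.Set.mem_ofList _ _).mp hmem)

lemma pvDedup_snoc_mem (q : List Int) (c : Int) (hc : c ∈ q) :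
    PySem.List.dedup (q ++ [c]) = PySem.List.dedup q := by
  simp only [PySem.List.dedup_eq_ofList, PySem.Set.ofList_append_singleton, PySem.Set.add]
  rw [if_pos]
  simp only [PySem.Set.contains_eq_listContains, List.contains_eq_mem, decide_eq_true_eq]
  exact (PySem.Set.mem_ofList _ _).mpr hc

lemma pvFilter_snoc_unchanged (T' q : List Int) (c2 : Int) (h : c2 ∈ q ∨ c2 ∉ T') :
    T'.filter (fun x => decide (x ∈ q ++ [c2])) = T'.filter (fun x => decide (x ∈ q)) := by
  apply List.filter_congr
  intro x hx
  rw [decide_eq_decide]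
  simp only [List.mem_append, List.mem_singleton]
  constructor
  · rintro (h1 | h1)
    · exact h1
    · rcases h with h2 | h2
      · exact h1 ▸ h2
      · exact absurd (h1 ▸ hx) h2
  · exact Or.inl

lemma pvFilter_snoc_step (U S T' : List Int) (c c2 : Int) (q : List Int)
    (hU : U.Nodup) (hsplit : U = S ++ c :: T')
    (hpre : PySem.List.dedup q ++ [c2] <+: U) (hc2T : c2 ∈ T') (hnq : c2 ∉ q) :
    T'.filter (fun x => decide (x ∈ q ++ [c2])) = T'.filter (fun x => decide (x ∈ q)) ++ [c2] := by
  obtain ⟨A, B, hT⟩ := List.append_of_mem hc2T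
  obtain ⟨R, hR⟩ := hpre
  -- U = (S ++ c :: A) ++ c2 :: B  and  U = dedup q ++ c2 :: R
  have hU1 : (S ++ c :: A) ++ c2 :: B = U := by rw [hsplit, hT]; simp
  have hU2 : PySem.List.dedup q ++ c2 :: R = U := by rw [← hR]; simp
  -- c2 not in either prefix
  have hnodupT : (S ++ c :: T').Nodup := hsplit ▸ hU
  have hc2L : c2 ∉ S ++ c :: A := by
    intro hmem
    have h1 : ((S ++ c :: A) ++ c2 :: B).Nodup := hU1.symm ▸ hU
    rw [List.nodup_append] at h1
    exact h1.2.2 c2 hmem c2 List.mem_cons_self rfl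
  have hc2D : c2 ∉ PySem.List.dedup q := by
    intro hmem
    exact hnq ((PySem.List.mem_dedup _ _).mp hmem)
  obtain ⟨hDeq, hReq⟩ := pvSplit_unique (hU1.trans hU2.symm) hc2L hc2D
  -- members of A are in q; members of B are not in q and differ from c2
  have hAq : ∀ x ∈ A, x ∈ q := by
    intro x hx
    have : x ∈ PySem.List.dedup q := by
      rw [← hDeq]; simp [hx]
    exact (PySem.List.mem_dedup _ _).mp this
  have hBq : ∀ x ∈ B, x ∉ q ∧ x ≠ c2 := by
    intro x hx
    have h1 : ((S ++ c :: A) ++ c2 :: B).Nodup := hU1.symm ▸ hU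
    rw [List.nodup_append] at h1
    constructor
    · intro hxq
      have hxD : x ∈ S ++ c :: A := by
        rw [hDeq]
        exact (PySem.List.mem_dedup _ _).mpr hxq
      exact h1.2.2 x hxD x (List.mem_cons_of_mem _ hx) rfl
    · intro hx2
      have := h1.2.1
      rw [List.nodup_cons] at this
      exact this.1 (hx2 ▸ hx)
  -- compute both filters on T' = A ++ c2 :: B
  rw [hT]
  simp only [List.filter_append, List.filter_cons]
  have hA1 : A.filter (fun x => decide (x ∈ q ++ [c2])) = A := by
    apply List.filter_eq_self.mpr
    intro x hx
    simp [List.mem_append, hAq x hx]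
  have hA2 : A.filter (fun x => decide (x ∈ q)) = A := by
    apply List.filter_eq_self.mpr
    intro x hx
    simp [hAq x hx]
  have hB1 : B.filter (fun x => decide (x ∈ q ++ [c2])) = [] := by
    apply List.filter_eq_nil_iff.mpr
    intro x hx
    simp only [List.mem_append, List.mem_singleton, decide_eq_true_eq, not_or]
    exact ⟨(hBq x hx).1, (hBq x hx).2⟩
  have hB2 : B.filter (fun x => decide (x ∈ q)) = [] := by
    apply List.filter_eq_nil_iff.mpr
    intro x hx
    simp [(hBq x hx).1]
  rw [hA1, hA2, hB1, hB2]
  have hc2in : (decide (c2 ∈ q ++ [c2])) = true := by simp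
  have hc2out : (decide (c2 ∈ q)) = false := by simp [hnq]
  rw [hc2in, hc2out]
  simp

lemma pvFoldl_fixed {α β : Type} (f : β → α → β) (st : β) :
    ∀ r : List α, (∀ x ∈ r, f st x = st) → r.foldl f st = st := by
  intro r
  induction r with
  | nil => intro _; rfl
  | cons a r ih =>
    intro h
    rw [List.foldl_cons, h a List.mem_cons_self]
    exact ih (fun x hx => h x (List.mem_cons_of_mem _ hx))

lemma pvInner_spec (l S T' : List Int) (c : Int) (hsplit : PySem.List.dedup l = S ++ c :: T') :
    ∀ (r q : List Int), q ++ r = l →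
      r.foldl (fun st char2 =>
          if c ≠ char2 then
            if ¬ (pvIsInList st.1 c char2 = true)
            then (st.1 ++ [(st.2, c, char2)], st.2 + 1)
            else st
          else st)
        (pvF (pvPP S (c :: T') ++ (T'.filter (fun x => decide (x ∈ q))).map (fun b => (c, b))))
      = pvF (pvPP S (c :: T') ++ (T'.filter (fun x => decide (x ∈ l))).map (fun b => (c, b))) := by
  have hU : (PySem.List.dedup l).Nodup := PySem.List.nodup_dedup l
  have hnd : (S ++ c :: T').Nodup := hsplit ▸ hU
  rw [List.nodup_append] at hnd
  have hcnotS : c ∉ S := fun hm => hnd.2.2 c hm c List.mem_cons_self rfl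
  have hcnotT : c ∉ T' := (List.nodup_cons.mp hnd.2.1).1
  intro r
  induction r with
  | nil =>
    intro q hq
    rw [List.append_nil] at hq
    rw [hq, List.foldl_nil]
  | cons c2 r' ih =>
    intro q hq
    have hc2l : c2 ∈ l := by rw [← hq]; simp
    have hc2U : c2 ∈ S ++ c :: T' := by
      rw [← hsplit]
      exact (PySem.List.mem_dedup _ _).mpr hc2l
    have hq' : (q ++ [c2]) ++ r' = l := by rw [← hq]; simp
    rw [List.foldl_cons]
    by_cases hc2c : c2 = c
    · subst hc2c
      rw [if_neg (by simp)]
      rw [← pvFilter_snoc_unchanged T' q c2 (Or.inr hcnotT)] at *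
      exact ih (q ++ [c2]) hq'
    · rw [if_pos (fun h => hc2c h.symm)]
      rcases List.mem_append.mp hc2U with hc2S | hc2cT
      · -- c2 ∈ S : the pair is already present, state unchanged
        have hc2notT : c2 ∉ T' := fun hm => hnd.2.2 c2 hc2S c2 (List.mem_cons_of_mem _ hm) rfl
        have hin : pvIsInList (pvF (pvPP S (c :: T') ++ (T'.filter (fun x => decide (x ∈ q))).map (fun b => (c, b)))).1 c c2 = true := by
          show pvIsInList (pvNum _) c c2 = true
          rw [pvIsInList_num]
          rcases mem_pvPP S (c :: T') c2 c hc2S (by simp) hc2c with hm | hm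
          · exact Or.inr (List.mem_append_left _ hm)
          · exact Or.inl (List.mem_append_left _ hm)
        rw [if_neg (by simp [hin])]
        rw [← pvFilter_snoc_unchanged T' q c2 (Or.inr hc2notT)] at *
        exact ih (q ++ [c2]) hq'
      · have hc2T : c2 ∈ T' := by
          rcases List.mem_cons.mp hc2cT with h | h
          · exact absurd h hc2c
          · exact h
        have hc2notS : c2 ∉ S := fun hm => hnd.2.2 c2 hm c2 (List.mem_cons_of_mem _ hc2T) rfl
        by_cases hqmem : c2 ∈ q
        · -- already paired with c in this inner loop
          have hin : pvIsInList (pvF (pvPP S (c :: T') ++ (T'.filter (fun x => decide (x ∈ q))).map (fun b => (c, b)))).1 c c2 = true := by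
            show pvIsInList (pvNum _) c c2 = true
            rw [pvIsInList_num]
            refine Or.inl (List.mem_append_right _ ?_)
            simp only [List.mem_map, List.mem_filter]
            exact ⟨c2, ⟨hc2T, by simp [hqmem]⟩, rfl⟩
          rw [if_neg (by simp [hin])]
          rw [← pvFilter_snoc_unchanged T' q c2 (Or.inl hqmem)] at *
          exact ih (q ++ [c2]) hq'
        · -- a new pair is appended
          have hout : pvIsInList (pvF (pvPP S (c :: T') ++ (T'.filter (fun x => decide (x ∈ q))).map (fun b => (c, b)))).1 c c2 = false := by
            show pvIsInList (pvNum _) c c2 = false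
            rw [Bool.eq_false_iff]
            intro htrue
            rw [pvIsInList_num] at htrue
            rcases htrue with hm | hm
            · rcases List.mem_append.mp hm with hp | hp
              · exact hcnotS (fst_of_mem_pvPP _ _ _ hp)
              · rcases List.mem_map.mp hp with ⟨b, hb, heq⟩
                have : b = c2 := (Prod.mk.injEq _ _ _ _ ▸ heq).2
                rw [this] at hb
                exact hqmem (by simpa using (List.mem_filter.mp hb).2)
            · rcases List.mem_append.mp hm with hp | hp
              · exact hc2notS (fst_of_mem_pvPP _ _ _ hp)
              · rcases List.mem_map.mp hp with ⟨b, _, heq⟩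
                exact hc2c ((Prod.mk.injEq _ _ _ _ ▸ heq).1).symm
          rw [if_pos (by simp [hout])]
          rw [pvF_append]
          have hpre : PySem.List.dedup q ++ [c2] <+: PySem.List.dedup l := by
            rw [← pvDedup_snoc_not_mem q c2 hqmem, ← hq']
            exact pvDedup_prefix (q ++ [c2]) r'
          have hstep := pvFilter_snoc_step (PySem.List.dedup l) S T' c c2 q hU hsplit hpre hc2T hqmem
          have hP : pvPP S (c :: T') ++ (T'.filter (fun x => decide (x ∈ q))).map (fun b => (c, b)) ++ [(c, c2)]
              = pvPP S (c :: T') ++ (T'.filter (fun x => decide (x ∈ q ++ [c2]))).map (fun b => (c, b)) := by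
            rw [hstep]
            simp
          rw [hP]
          exact ih (q ++ [c2]) hq'

lemma pvOuter_spec (l : List Int) : ∀ (r q S T : List Int), q ++ r = l →
    PySem.List.dedup q = S → PySem.List.dedup l = S ++ T →
    r.foldl (fun st char1 => pvInnerLoop l char1 st) (pvF (pvPP S T))
      = pvF (pvPP (PySem.List.dedup l) []) := by
  intro r
  induction r with
  | nil =>
    intro q S T hq hS hT
    rw [List.append_nil] at hq
    subst hq
    have hTnil : T = [] := by
      have h1 : S ++ T = S ++ [] := by
        rw [List.append_nil, ← hT]
        exact hS
      exact List.append_cancel_left h1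
    subst hTnil
    rw [List.foldl_nil, hT, List.append_nil]
  | cons c r' ih =>
    intro q S T hq hS hT
    have hcl : c ∈ l := by rw [← hq]; simp
    have hq' : (q ++ [c]) ++ r' = l := by rw [← hq]; simp
    rw [List.foldl_cons]
    by_cases hc : c ∈ q
    · -- duplicate outer element: the whole inner loop is a no-op
      have hcS : c ∈ S := by
        rw [← hS]
        exact (PySem.List.mem_dedup _ _).mpr hc
      have hnoop : pvInnerLoop l c (pvF (pvPP S T)) = pvF (pvPP S T) := by
        unfold pvInnerLoop
        apply pvFoldl_fixed
        intro x hx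
        by_cases hxc : c = x
        · rw [if_neg (by simp [hxc])]
        · rw [if_pos hxc]
          have hxU : x ∈ S ++ T := by
            rw [← hT]
            exact (PySem.List.mem_dedup _ _).mpr hx
          have hin : pvIsInList (pvF (pvPP S T)).1 c x = true := by
            show pvIsInList (pvNum _) c x = true
            rw [pvIsInList_num]
            rcases mem_pvPP S T c x hcS hxU hxc with hm | hm
            · exact Or.inl hm
            · exact Or.inr hm
          rw [if_neg (by simp [hin])]
      rw [hnoop]
      exact ih (q ++ [c]) S T hq' (by rw [pvDedup_snoc_mem q c hc, hS]) hT
    · -- new outer element: c is the next unique value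
      have hSc : PySem.List.dedup (q ++ [c]) = S ++ [c] := by
        rw [pvDedup_snoc_not_mem q c hc, hS]
      have hpre : S ++ [c] <+: S ++ T := by
        rw [← hSc, ← hT, ← hq']
        exact pvDedup_prefix (q ++ [c]) r'
      obtain ⟨X, hX⟩ := hpre
      have hTX : T = c :: X := by
        have : S ++ ([c] ++ X) = S ++ T := by rw [← List.append_assoc, hX]
        have := List.append_cancel_left this
        simpa using this.symm
      subst hTX
      have hsplit : PySem.List.dedup l = S ++ c :: X := hT
      have hstart : pvPP S (c :: X) ++ (X.filter (fun x => decide (x ∈ ([] : List Int)))).map (fun b => (c, b)) = pvPP S (c :: X) := by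
        simp
      have hinner := pvInner_spec l S X c hsplit l [] (by simp)
      rw [hstart] at hinner
      have hXfull : X.filter (fun x => decide (x ∈ l)) = X := by
        apply List.filter_eq_self.mpr
        intro x hx
        have : x ∈ PySem.List.dedup l := by rw [hT]; simp [hx]
        simp [(PySem.List.mem_dedup _ _).mp this]
      rw [hXfull] at hinner
      have hres : pvInnerLoop l c (pvF (pvPP S (c :: X))) = pvF (pvPP (S ++ [c]) X) := by
        unfold pvInnerLoop
        rw [hinner, pvPP_append_cons]
      rw [hres]
      exact ih (q ++ [c]) (S ++ [c]) X hq' hSc (by rw [hT]; simp)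

theorem create_fights_spec : Claim_equal_create_fights := by
  intro l _
  unfold Spec_create_fights
  rw [pvAlt_eq]
  unfold create_fights
  have h := pvOuter_spec l l [] [] (PySem.List.dedup l) (by simp) (by simp [PySem.List.dedup_eq_ofList]) (by simp)
  have hstart : pvF (pvPP [] (PySem.List.dedup l)) = (([] : List (Int × Int × Int)), (0 : Int)) := by
    simp [pvF, pvPP_nil, pvNum, PySem.List.enumerate_nil]
  rw [hstart] at h
  rw [h]
  rfl
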